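-- pv_equiv track=rewrite | github.com/pypi-data/pypi-mirror-82 | packages/presto/presto-0.6.2.tar.gz/presto-0.6.2/presto/Sequence.py | translateAmbigDNA
-- ===== SOURCE A (Python) =====
-- def translateAmbigDNA(key):
--     """
--     Translates IUPAC Ambiguous Nucleotide characters to or from character sets
--
--     Arguments:
--       key : String or re.search object containing the character set to translate
--
--     Returns:
--       str : Character translation
--     """
--     # Define valid characters and character translations
--     IUPAC_uniq = '-.ACGT'
--     IUPAC_ambig = 'BDHKMNRSVWY'
--     IUPAC_trans = {'AG':'R', 'CT':'Y', 'CG':'S', 'AT':'W', 'GT':'K', 'AC':'M',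
--                   'CGT':'B', 'AGT':'D', 'ACT':'H', 'ACG':'V', 'ABCDGHKMRSTVWY':'N',
--                   '-.':'.'}
--
--     # Convert passed regular expression match to a string
--     if hasattr(key, 'group'): key = key.group(1)
--
--     # Sort character in alphabetic order
--     key = ''.join(sorted(key))
--
--     # Return input character if no translation needed
--     if len(key) == 1 and key in IUPAC_uniq:
--         return key
--     # Return regular expression string for ambiguous single character
--     elif len(key) == 1 and key in IUPAC_ambig:
--         return ['[' + k + ']' for k, v in IUPAC_trans.items() if v == key][0]
--     # Return single ambiguous character for character set
--     elif key in IUPAC_trans: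
--         return IUPAC_trans[key]
--     else:
--         return 'N'
-- ===== SOURCE B (Python) =====
-- def translateAmbigDNA(key):
--     """
--     Translates IUPAC Ambiguous Nucleotide characters to or from character sets
--
--     Arguments:
--       key : String or re.search object containing the character set to translate
--
--     Returns:
--       str : Character translation
--     """
--     # Bit-parallel encoding: each nucleotide is a bit (A=1, C=2, G=4, T=8); an
--     # IUPAC ambiguity character's mask is the OR of its nucleotides, and the
--     # character for a union mask is read off one indexed string.
--     MASK_CHAR = '?ACMGRSVTWYHKDBN'
--     CHAR_MASK = {'A': 1, 'C': 2, 'M': 3, 'G': 4, 'R': 5, 'S': 6, 'V': 7,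
--                  'T': 8, 'W': 9, 'Y': 10, 'H': 11, 'K': 12, 'D': 13, 'B': 14,
--                  'N': 15}
--
--     # Convert passed regular expression match to a string
--     if hasattr(key, 'group'): key = key.group(1)
--
--     chars = sorted(key)
--
--     if len(chars) == 1:
--         c = chars[0]
--         if c in '-.':
--             return c
--         m = CHAR_MASK.get(c, 0)
--         if m == 0:
--             return 'N'
--         if m & (m - 1) == 0:
--             # a single bit: a plain nucleotide, returned unchanged
--             return c
--         if c == 'N':
--             # N stands for any code, not just the four plain nucleotides
--             return '[ABCDGHKMRSTVWY]'
--         return '[' + ''.join(b for b in 'ACGT' if CHAR_MASK[b] & m) + ']'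
--
--     # the gap character set
--     if chars == ['-', '.']:
--         return '.'
--
--     # union the nucleotide bits; a repeated character or a non-nucleotide
--     # means the set has no translation
--     m = 0
--     prev = None
--     for c in chars:
--         if c == prev or c not in 'ACGT':
--             return 'N'
--         m |= CHAR_MASK[c]
--         prev = c
--     return MASK_CHAR[m] if m else 'N'
-- ===== Notes on version B (the rewrite author's own statement) =====
-- stated objective: alternative
-- what changed: B replaces A's translation dictionary with its per-call linear reverse scan by a bit-parallel encoding: each nucleotide is a bit (A=1,C=2,G=4,T=8), a multi-character set is translated by OR-ing the bits in one loop (rejecting repeats and non-nucleotides) and indexing a 16-entry mask-to-character string, and a single ambiguity character is expanded by testing its mask's bits; only the gap character set and the letter N keep explicit cases.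
import Mathlib
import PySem

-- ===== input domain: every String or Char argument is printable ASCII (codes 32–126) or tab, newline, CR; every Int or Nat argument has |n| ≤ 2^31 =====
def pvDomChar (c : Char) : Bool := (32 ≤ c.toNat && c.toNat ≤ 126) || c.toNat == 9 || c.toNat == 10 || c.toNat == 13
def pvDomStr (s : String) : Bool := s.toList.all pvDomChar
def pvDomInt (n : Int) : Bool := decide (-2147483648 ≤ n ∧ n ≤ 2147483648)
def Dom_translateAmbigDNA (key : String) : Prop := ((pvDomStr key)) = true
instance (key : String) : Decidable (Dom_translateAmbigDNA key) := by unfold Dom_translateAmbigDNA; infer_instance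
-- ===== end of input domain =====

-- B replaces A's translation dictionary (with its per-call linear reverse scan) by a bit-parallel
-- encoding: nucleotides are bits, a set is translated by OR-ing bits in one loop and indexing a
-- 16-entry mask-to-character string. Objective: alternative algorithm, same cost.

-- ===== PORT A =====
def pvUniqA : String := "-.ACGT"
def pvAmbigA : String := "BDHKMNRSVWY"
def pvTransA : PySem.Dict String String :=
  PySem.Dict.ofList
    [("AG","R"),("CT","Y"),("CG","S"),("AT","W"),("GT","K"),("AC","M"),
     ("CGT","B"),("AGT","D"),("ACT","H"),("ACG","V"),("ABCDGHKMRSTVWY","N"),("-.",".")]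

-- A's branch cascade, applied to the already-sorted key
def pvBranchA (key : String) : String :=
  if PySem.Str.len key == 1 && PySem.Str.isIn key pvUniqA then key
  else if PySem.Str.len key == 1 && PySem.Str.isIn key pvAmbigA then
    -- ['[' + k + ']' for k, v in IUPAC_trans.items() if v == key][0]
    -- (the IndexError case, an empty list, is unreachable here: every pvAmbigA char is a value of pvTransA)
    (PySem.List.pyGet? ((pvTransA.items.filter (fun kv => kv.2 == key)).map (fun kv => "[" ++ kv.1 ++ "]")) 0).getD ""
  else
    -- elif key in IUPAC_trans: return IUPAC_trans[key]  /  else: return 'N'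
    match pvTransA.get? key with
    | some v => v
    | none => "N"

def translateAmbigDNA (key : String) : String :=
  -- key = ''.join(sorted(key)), then the branch cascade
  pvBranchA (String.ofList (PySem.List.sorted key.toList id))

-- ===== PORT B =====
-- MASK_CHAR: the character for each union of nucleotide bits (A=1, C=2, G=4, T=8)
def pvMaskCharB : List Char := "?ACMGRSVTWYHKDBN".toList
-- CHAR_MASK: the bit mask of each nucleotide / ambiguity character
def pvCharMaskB : PySem.Dict Char Int :=
  PySem.Dict.ofList
    [('A',1),('C',2),('M',3),('G',4),('R',5),('S',6),('V',7),
     ('T',8),('W',9),('Y',10),('H',11),('K',12),('D',13),('B',14),('N',15)]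

-- the single-character branch of B
def pvSingleB (c : Char) : String :=
  if PySem.Chars.isIn [c] "-.".toList then String.ofList [c]
  else
    let m := pvCharMaskB.getD c 0                      -- CHAR_MASK.get(c, 0)
    if m == 0 then "N"
    else if PySem.Int.band m (m - 1) == 0 then String.ofList [c]   -- a single bit: plain nucleotide
    else if c == 'N' then "[ABCDGHKMRSTVWY]"
    else String.ofList
      ('[' :: ("ACGT".toList.filter (fun b => !(PySem.Int.band (pvCharMaskB.getD b 0) m == 0))) ++ [']'])

-- the union loop over the sorted characters; returning "N" in the guard is Python's early return
def pvLoopB (prev : Option Char) (m : Int) : List Char → String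
  | [] => if !(m == 0) then String.ofList [(PySem.List.pyGet? pvMaskCharB m).getD '?'] else "N"
         -- MASK_CHAR[m]: m is 1..15 whenever this line is reached, so pyGet? never misses
  | c :: rest =>
      if some c == prev || !(PySem.Chars.isIn [c] "ACGT".toList) then "N"
      else pvLoopB (some c) (PySem.Int.bor m (pvCharMaskB.getD c 0)) rest

def pvBodyB : List Char → String
  | [c] => pvSingleB c
  | chars => if chars == ['-', '.'] then "." else pvLoopB none 0 chars

def translateAmbigDNA_alt (key : String) : String :=
  pvBodyB (PySem.List.sorted key.toList id)

-- ===== PRECONDITION & SPEC =====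
def Spec_translateAmbigDNA (key : String) (out : String) : Prop := out = translateAmbigDNA_alt key
instance (key : String) (out : String) : Decidable (Spec_translateAmbigDNA key out) := by unfold Spec_translateAmbigDNA; infer_instance

-- ===== CLAIM (what is proved, stated in full; the proofs are below) =====
def Claim_equal_translateAmbigDNA : Prop := ∀ (key : String), Dom_translateAmbigDNA key → Spec_translateAmbigDNA key (translateAmbigDNA key)

-- ===== LEMMAS AND PROOFS =====

-- the 13 multi-character lists on which both cascades are decided concretely:
-- the 11 sorted nucleotide sets of size ≥ 2, the gap set '-.', and the key of the 'N' entry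
def pvBigList : List (List Char) :=
  [['A','C'],['A','G'],['A','T'],['C','G'],['C','T'],['G','T'],
   ['A','C','G'],['A','C','T'],['A','G','T'],['C','G','T'],['A','C','G','T'],
   ['-','.'], "ABCDGHKMRSTVWY".toList]

-- a string literal differs from ofList l when its character list does
lemma pvStrNe (s : String) (l : List Char) (h : (s.toList == l) = false) :
    (s == String.ofList l) = false := by
  rw [← String.ofList_toList (s := s)]
  simp only [String.ofList_inj, beq_eq_false_iff_ne, ne_eq] at *
  exact h

-- pairwise (≤) plus adjacent (≠) gives pairwise (<)
lemma pvPairwiseLt (l : List Char) (h1 : l.Pairwise (· ≤ ·)) (h2 : l.IsChain (· ≠ ·)) :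
    l.Pairwise (· < ·) := by
  induction l with
  | nil => simp
  | cons a t ih =>
    rw [List.pairwise_cons] at h1 ⊢
    rw [List.isChain_cons] at h2
    have ht := ih h1.2 h2.2
    refine ⟨?_, ht⟩
    intro b hb
    cases t with
    | nil => simp at hb
    | cons c t' =>
      have hac : a < c := lt_of_le_of_ne (h1.1 c (by simp)) (h2.1 c (by simp))
      rcases List.mem_cons.mp hb with rfl | hb'
      · exact hac
      · exact lt_of_lt_of_le hac ((List.pairwise_cons.1 h1.2).1 b hb')

-- B's union loop returns "N" whenever the characters (prefixed by prev) are not an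
-- adjacent-distinct chain of plain nucleotides
lemma pvLoopB_N (l : List Char) : ∀ (prev : Option Char) (m : Int),
    ¬ ((prev.toList ++ l).IsChain (· ≠ ·) ∧ ∀ c ∈ l, c ∈ (['A','C','G','T'] : List Char)) →
    pvLoopB prev m l = "N" := by
  induction l with
  | nil =>
    intro prev m h
    exfalso
    apply h
    refine ⟨?_, by simp⟩
    cases prev <;> simp
  | cons c rest ih =>
    intro prev m h
    rw [pvLoopB]
    by_cases hg : (some c == prev || !(PySem.Chars.isIn [c] "ACGT".toList)) = true
    · rw [if_pos hg]
    · rw [if_neg hg]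
      simp only [Bool.or_eq_true, Bool.not_eq_true', not_or, Bool.not_eq_false] at hg
      obtain ⟨hne, hin⟩ := hg
      have hc : c ∈ (['A','C','G','T'] : List Char) := by
        have := (PySem.Chars.isIn_iff_infix (sub := [c]) (s := "ACGT".toList)).mp hin
        simpa [List.singleton_infix_iff] using this
      apply ih (some c)
      rintro ⟨hch, hg'⟩
      apply h
      constructor
      · cases prev with
        | none => exact hch
        | some p =>
          rw [Option.toList, List.cons_append, List.isChain_cons]
          refine ⟨?_, hch⟩
          intro y hy
          simp only [List.nil_append, List.head?_cons, Option.mem_def, Option.some.injEq] at hy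
          subst hy
          simp only [beq_iff_eq, Option.some.injEq] at hne
          exact fun e => hne e.symm
      · intro x hx
        rcases List.mem_cons.mp hx with rfl | hx
        · exact hc
        · exact hg' x hx

-- a chain of distinct nucleotides in weakly increasing order is a sublist of ACGT,
-- hence one of its 16 sublists
lemma pvMem16 (l : List Char) (hp : l.Pairwise (· ≤ ·)) (hch : l.IsChain (· ≠ ·))
    (hg : ∀ c ∈ l, c ∈ (['A','C','G','T'] : List Char)) :
    l ∈ ([[], ['A'], ['C'], ['A','C'], ['G'], ['A','G'], ['C','G'], ['A','C','G'],
          ['T'], ['A','T'], ['C','T'], ['A','C','T'], ['G','T'], ['A','G','T'],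
          ['C','G','T'], ['A','C','G','T']] : List (List Char)) := by
  have hlt : l.Pairwise (· < ·) := pvPairwiseLt l hp hch
  have hsub : List.Sublist l ['A','C','G','T'] :=
    List.sublist_of_subperm_of_pairwise (List.Nodup.subperm (hlt.imp ne_of_lt) hg) hlt (by decide)
  have h16 : l ∈ (['A','C','G','T'] : List Char).sublists := List.mem_sublists.2 hsub
  have he : (['A','C','G','T'] : List Char).sublists =
      [[], ['A'], ['C'], ['A','C'], ['G'], ['A','G'], ['C','G'], ['A','C','G'],
       ['T'], ['A','T'], ['C','T'], ['A','C','T'], ['G','T'], ['A','G','T'],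
       ['C','G','T'], ['A','C','G','T']] := by decide
  rwa [he] at h16

-- the single-character case: A's cascade equals B's bit test, for every character
lemma pvSingleCase (c : Char) : pvBranchA (String.ofList [c]) = pvSingleB c := by
  by_cases hc : c ∈ ['-','.','A','C','G','T','B','D','H','K','M','N','R','S','V','W','Y']
  · fin_cases hc <;> decide
  · simp only [List.mem_cons, not_or] at hc
    obtain ⟨h1,h2,h3,h4,h5,h6,h7,h8,h9,h10,h11,h12,h13,h14,h15,h16,h17,-⟩ := hc
    have hu : PySem.Chars.isIn [c] pvUniqA.toList = false := by
      rw [PySem.Chars.isIn_eq_false_iff]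
      simp [pvUniqA, List.singleton_infix_iff, h1,h2,h3,h4,h5,h6]
    have ha : PySem.Chars.isIn [c] pvAmbigA.toList = false := by
      rw [PySem.Chars.isIn_eq_false_iff]
      simp [pvAmbigA, List.singleton_infix_iff, h7,h8,h9,h10,h11,h12,h13,h14,h15,h16,h17]
    have hd : PySem.Chars.isIn [c] (['-', '.'] : List Char) = false := by
      rw [PySem.Chars.isIn_eq_false_iff]
      simp [List.singleton_infix_iff, h1,h2]
    have b3 : ('A' == c) = false := by simp [Ne.symm h3]
    have b4 : ('C' == c) = false := by simp [Ne.symm h4]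
    have b5 : ('G' == c) = false := by simp [Ne.symm h5]
    have b6 : ('T' == c) = false := by simp [Ne.symm h6]
    have b7 : ('B' == c) = false := by simp [Ne.symm h7]
    have b8 : ('D' == c) = false := by simp [Ne.symm h8]
    have b9 : ('H' == c) = false := by simp [Ne.symm h9]
    have b10 : ('K' == c) = false := by simp [Ne.symm h10]
    have b11 : ('M' == c) = false := by simp [Ne.symm h11]
    have b12 : ('N' == c) = false := by simp [Ne.symm h12]
    have b13 : ('R' == c) = false := by simp [Ne.symm h13]
    have b14 : ('S' == c) = false := by simp [Ne.symm h14]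
    have b15 : ('V' == c) = false := by simp [Ne.symm h15]
    have b16 : ('W' == c) = false := by simp [Ne.symm h16]
    have b17 : ('Y' == c) = false := by simp [Ne.symm h17]
    simp [pvBranchA, pvSingleB, pvTransA, pvCharMaskB,
      PySem.Dict.getD, PySem.Dict.get?, PySem.Dict.insert, PySem.Dict.ofList, PySem.Dict.update, PySem.Dict.empty,
      PySem.Str.len, hu, ha, hd, List.find?, Option.getD, pvStrNe,
      b3,b4,b5,b6,b7,b8,b9,b10,b11,b12,b13,b14,b15,b16,b17]

-- the main lemma: on any weakly sorted character list the two cascades agree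
lemma pvMain (l : List Char) (hp : l.Pairwise (· ≤ ·)) :
    pvBranchA (String.ofList l) = pvBodyB l := by
  match l, hp with
  | [], _ => decide
  | [c], _ => exact pvSingleCase c
  | c1 :: c2 :: rest, hp =>
    by_cases hmem : (c1 :: c2 :: rest) ∈ pvBigList
    · simp only [pvBigList, List.mem_cons, List.not_mem_nil, or_false] at hmem
      rcases hmem with h|h|h|h|h|h|h|h|h|h|h|h|h <;> (rw [h]; decide)
    · simp only [pvBigList, List.mem_cons, List.not_mem_nil, or_false, not_or] at hmem
      obtain ⟨n1,n2,n3,n4,n5,n6,n7,n8,n9,n10,n11,n12,n13⟩ := hmem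
      have h0 : ((rest.length : Int) + 1 + 1 == 1) = false := by
        simp; omega
      have hB : pvLoopB none 0 (c1 :: c2 :: rest) = "N" := by
        apply pvLoopB_N
        rintro ⟨hch, hg⟩
        have h16 := pvMem16 _ hp (by simpa using hch) hg
        simp only [List.mem_cons, List.not_mem_nil, or_false] at h16
        rcases h16 with h|h|h|h|h|h|h|h|h|h|h|h|h|h|h|h <;> simp_all
      have m1 : (("AG" : String) == String.ofList (c1 :: c2 :: rest)) = false :=
        pvStrNe _ _ (by rw [beq_eq_false_iff_ne]; exact fun e => n2 e.symm)
      have m2 : (("CT" : String) == String.ofList (c1 :: c2 :: rest)) = false :=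
        pvStrNe _ _ (by rw [beq_eq_false_iff_ne]; exact fun e => n5 e.symm)
      have m3 : (("CG" : String) == String.ofList (c1 :: c2 :: rest)) = false :=
        pvStrNe _ _ (by rw [beq_eq_false_iff_ne]; exact fun e => n4 e.symm)
      have m4 : (("AT" : String) == String.ofList (c1 :: c2 :: rest)) = false :=
        pvStrNe _ _ (by rw [beq_eq_false_iff_ne]; exact fun e => n3 e.symm)
      have m5 : (("GT" : String) == String.ofList (c1 :: c2 :: rest)) = false :=
        pvStrNe _ _ (by rw [beq_eq_false_iff_ne]; exact fun e => n6 e.symm)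
      have m6 : (("AC" : String) == String.ofList (c1 :: c2 :: rest)) = false :=
        pvStrNe _ _ (by rw [beq_eq_false_iff_ne]; exact fun e => n1 e.symm)
      have m7 : (("CGT" : String) == String.ofList (c1 :: c2 :: rest)) = false :=
        pvStrNe _ _ (by rw [beq_eq_false_iff_ne]; exact fun e => n10 e.symm)
      have m8 : (("AGT" : String) == String.ofList (c1 :: c2 :: rest)) = false :=
        pvStrNe _ _ (by rw [beq_eq_false_iff_ne]; exact fun e => n9 e.symm)
      have m9 : (("ACT" : String) == String.ofList (c1 :: c2 :: rest)) = false :=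
        pvStrNe _ _ (by rw [beq_eq_false_iff_ne]; exact fun e => n8 e.symm)
      have m10 : (("ACG" : String) == String.ofList (c1 :: c2 :: rest)) = false :=
        pvStrNe _ _ (by rw [beq_eq_false_iff_ne]; exact fun e => n7 e.symm)
      have m11 : (("ABCDGHKMRSTVWY" : String) == String.ofList (c1 :: c2 :: rest)) = false :=
        pvStrNe _ _ (by rw [beq_eq_false_iff_ne]; exact fun e => n13 e.symm)
      have m12 : (("-." : String) == String.ofList (c1 :: c2 :: rest)) = false :=
        pvStrNe _ _ (by rw [beq_eq_false_iff_ne]; exact fun e => n12 e.symm)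
      have hA : pvBranchA (String.ofList (c1 :: c2 :: rest)) = "N" := by
        simp [pvBranchA, pvTransA, PySem.Dict.get?, PySem.Dict.insert, PySem.Dict.ofList, PySem.Dict.update,
          PySem.Dict.empty, PySem.Str.len, h0, List.find?,
          m1,m2,m3,m4,m5,m6,m7,m8,m9,m10,m11,m12]
      have hne : ((c1 :: c2 :: rest) == ['-', '.']) = false := by
        rw [beq_eq_false_iff_ne]; exact n12
      rw [hA,
        show pvBodyB (c1 :: c2 :: rest) =
          (if (c1 :: c2 :: rest) == ['-', '.'] then "." else pvLoopB none 0 (c1 :: c2 :: rest))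
          from rfl,
        hne]
      simp [hB]

-- ===== VERDICT (by name: the statement is the Claim_ definition above) =====
theorem translateAmbigDNA_spec : Claim_equal_translateAmbigDNA := by
  intro key _
  unfold Spec_translateAmbigDNA translateAmbigDNA translateAmbigDNA_alt
  exact pvMain _ (PySem.List.sorted_pairwise key.toList id)
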